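-- pv_equiv track=rewrite | github.com/NoobyNull/Digital-Workshop | src/gui/theme/theme_validator.py | _check_color_consistency
-- ===== SOURCE A (Python) =====
-- from typing import Dict, List, Any, Tuple
--
-- def _check_color_consistency(colors: Dict[str, str]) -> List[str]:
--     """
--     Check for color consistency issues.
--
--     Args:
--         colors: Dictionary of colors
--
--     Returns:
--         List of consistency warnings
--     """
--     warnings = []
--
--     # Check for duplicate color values that might indicate errors
--     color_values = list(colors.values())
--     for i, color1 in enumerate(color_values):
--         for j, color2 in enumerate(color_values[i + 1 :], i + 1):
--             if color1 == color2:
--                 color_name1 = list(colors.keys())[i]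
--                 color_name2 = list(colors.keys())[j]
--                 warnings.append(
--                     f"Duplicate color value '{color1}' for '{color_name1}' and '{color_name2}'"
--                 )
--
--     return warnings
-- ===== SOURCE B (Python) =====
-- from typing import Dict, List
--
-- def _check_color_consistency(colors: Dict[str, str]) -> List[str]:
--     names = list(colors.keys())
--     values = list(colors.values())
--     # one pass: group the positions of each color value
--     positions = {}
--     for idx, value in enumerate(values):
--         positions.setdefault(value, []).append(idx)
--     warnings = []
--     for i, value in enumerate(values):
--         group = positions[value]
--         after = group.index(i) + 1
--         for j in group[after:]:
--             warnings.append(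
--                 f"Duplicate color value '{value}' for '{names[i]}' and '{names[j]}'"
--             )
--     return warnings
-- ===== Notes on version B (the rewrite author's own statement) =====
-- stated objective: faster
-- what changed: A's nested scan over values (which also rebuilds list(colors.keys()) from scratch for every duplicate found) is replaced by one grouping pass building a value -> positions index, after which each index just emits its later group-mates, preserving A's exact (i,j) emission order.
import Mathlib
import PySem

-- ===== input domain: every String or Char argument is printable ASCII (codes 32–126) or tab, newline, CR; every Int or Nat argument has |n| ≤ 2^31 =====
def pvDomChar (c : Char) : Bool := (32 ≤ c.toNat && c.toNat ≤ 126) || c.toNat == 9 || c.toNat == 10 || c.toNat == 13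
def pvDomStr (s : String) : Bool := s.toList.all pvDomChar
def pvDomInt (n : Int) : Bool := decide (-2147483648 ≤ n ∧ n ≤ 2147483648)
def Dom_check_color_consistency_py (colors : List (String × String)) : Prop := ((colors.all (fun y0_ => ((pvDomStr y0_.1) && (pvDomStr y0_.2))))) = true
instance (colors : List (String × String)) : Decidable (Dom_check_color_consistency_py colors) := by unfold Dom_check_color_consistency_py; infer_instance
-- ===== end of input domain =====

-- B replaces A's nested rescans (which also rebuild list(colors.keys()) on every match) by one
-- grouping pass recording each color value's positions, then emits each position's later group-mates.

-- ===== PORT A =====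
def check_color_consistency_py (colors : List (String × String)) : List String :=
  let d := PySem.Dict.ofList colors
  let color_values := PySem.Dict.values d
  (PySem.List.enumerate color_values 0).foldl
    (fun warnings p =>
      (PySem.List.enumerate (PySem.List.slice color_values (some (p.1 + 1)) none) (p.1 + 1)).foldl
        (fun warnings q =>
          if p.2 == q.2 then
            warnings ++ ["Duplicate color value '" ++ p.2 ++ "' for '" ++
              PySem.List.pyGetD (PySem.Dict.keys d) p.1 "" ++ "' and '" ++
              PySem.List.pyGetD (PySem.Dict.keys d) q.1 "" ++ "'"]
          else warnings)
        warnings)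
    []

-- ===== PORT B =====
def check_color_consistency_py_alt (colors : List (String × String)) : List String :=
  let d := PySem.Dict.ofList colors
  let names := PySem.Dict.keys d
  let values := PySem.Dict.values d
  let positions := (PySem.List.enumerate values 0).foldl
    (fun p q => p.modify q.2 [] (· ++ [q.1])) (PySem.Dict.empty : PySem.Dict String (List Int))
  (PySem.List.enumerate values 0).foldl
    (fun warnings p =>
      let group := positions.getD p.2 []
      let after : Int := ((PySem.List.index? group p.1).getD 0 : Nat) + 1
      (PySem.List.slice group (some after) none).foldl
        (fun warnings j =>
          warnings ++ ["Duplicate color value '" ++ p.2 ++ "' for '" ++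
            PySem.List.pyGetD names p.1 "" ++ "' and '" ++
            PySem.List.pyGetD names j "" ++ "'"])
        warnings)
    []

-- ===== PRECONDITION & SPEC =====
def Spec_check_color_consistency_py (colors : List (String × String)) (out : List String) : Prop := out = check_color_consistency_py_alt colors
instance (colors : List (String × String)) (out : List String) : Decidable (Spec_check_color_consistency_py colors out) := by unfold Spec_check_color_consistency_py; infer_instance

-- ===== CLAIM (what is proved, stated in full; the proofs are below) =====
def Claim_equal_check_color_consistency_py : Prop := ∀ (colors : List (String × String)), Dom_check_color_consistency_py colors → Spec_check_color_consistency_py colors (check_color_consistency_py colors)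

-- ===== LEMMAS AND PROOFS =====

-- B's grouping dict, looked up at v, holds exactly the enumerate indices whose value is v
theorem getD_groupFold (xs : List String) (s : Int) (d : PySem.Dict String (List Int)) (v : String) :
    (((PySem.List.enumerate xs s).foldl (fun p q => p.modify q.2 [] (· ++ [q.1])) d)).getD v []
    = d.getD v [] ++ (((PySem.List.enumerate xs s).filter (fun q => q.2 == v)).map (·.1)) := by
  induction xs generalizing s d with
  | nil => simp [PySem.List.enumerate_nil]
  | cons x xs ih =>
    rw [PySem.List.enumerate_cons]
    simp only [List.foldl_cons, List.filter_cons]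
    by_cases h : x = v
    · subst h
      rw [ih]
      simp [PySem.Dict.getD_modify_self]
    · rw [ih]
      rw [PySem.Dict.getD_modify_of_ne]
      · simp [h]
      · exact fun hvx => h hvx.symm

-- the heart: at index k, A's rescan of the tail equals B's tail of k's position group
theorem payload_eq (vs : List String) (k : Nat) (hk : k < vs.length) (msg : String → Int → Int → String) :
    ((PySem.List.enumerate (PySem.List.slice vs (some ((k:Int) + 1)) none) ((k:Int) + 1)).filter
        (fun q => vs[k] == q.2)).map (fun q => msg vs[k] (k:Int) q.1)
    = (PySem.List.slice
         ((((PySem.List.enumerate vs 0).filter (fun q => q.2 == vs[k])).map (·.1)))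
         (some ((((PySem.List.index? (((PySem.List.enumerate vs 0).filter (fun q => q.2 == vs[k])).map (·.1)) (k:Int)).getD 0 : Nat) : Int) + 1)) none).map
        (fun j => msg vs[k] (k:Int) j) := by
  have hslice : PySem.List.slice vs (some ((k:Int)+1)) none = vs.drop (k+1) := by
    have := PySem.List.slice_from_natCast vs (k+1)
    push_cast at this ⊢
    rw [← this]
  have henum : PySem.List.enumerate vs 0
      = PySem.List.enumerate (vs.take k) 0 ++ ((k:Int), vs[k]) :: PySem.List.enumerate (vs.drop (k+1)) ((k:Int)+1) := by
    conv_lhs => rw [show vs = vs.take k ++ vs[k] :: vs.drop (k+1) by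
      conv_lhs => rw [← List.take_append_drop k vs]
      rw [List.getElem_cons_drop]]
    rw [PySem.List.enumerate_append, PySem.List.enumerate_cons]
    have hlt : k ≤ vs.length := le_of_lt hk
    simp [List.length_take, Nat.min_eq_left hlt]
  have hgrp : (((PySem.List.enumerate vs 0).filter (fun q => q.2 == vs[k])).map (·.1))
      = ((((PySem.List.enumerate (vs.take k) 0).filter (fun q => q.2 == vs[k])).map (·.1)))
        ++ (k:Int) :: ((((PySem.List.enumerate (vs.drop (k+1)) ((k:Int)+1)).filter (fun q => q.2 == vs[k])).map (·.1))) := by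
    rw [henum]
    simp [List.filter_append]
  set Apre := (((PySem.List.enumerate (vs.take k) 0).filter (fun q => q.2 == vs[k])).map (·.1)) with hApre
  set Bsuf := (((PySem.List.enumerate (vs.drop (k+1)) ((k:Int)+1)).filter (fun q => q.2 == vs[k])).map (·.1)) with hBsuf
  have hnotmem : (k:Int) ∉ Apre := by
    rw [hApre]
    intro hmem
    simp only [List.mem_map, List.mem_filter] at hmem
    obtain ⟨q, ⟨hq, _⟩, hq1⟩ := hmem
    rw [PySem.List.mem_enumerate_iff] at hq
    obtain ⟨j, hj, rfl⟩ := hq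
    simp only [List.length_take] at hj
    simp at hq1
    omega
  have hidx : PySem.List.index? (Apre ++ (k:Int) :: Bsuf) (k:Int) = some Apre.length := by
    rw [PySem.List.index?_eq_some_iff]
    exact ⟨Apre, Bsuf, rfl, rfl, hnotmem⟩
  rw [hgrp, hidx]
  simp only [Option.getD_some]
  have hsl2 : PySem.List.slice (Apre ++ (k:Int) :: Bsuf) (some ((Apre.length : Int) + 1)) none
      = Bsuf := by
    have h1 : ((Apre.length : Int) + 1) = ((Apre.length + 1 : Nat) : Int) := by push_cast; ring
    rw [h1, PySem.List.slice_from_natCast]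
    rw [show Apre ++ (k:Int) :: Bsuf = (Apre ++ [(k:Int)]) ++ Bsuf by simp]
    rw [List.drop_left']
    simp
  rw [hsl2, hslice, hBsuf]
  rw [List.map_map]
  rw [List.filter_congr (l := PySem.List.enumerate (vs.drop (k+1)) ((k:Int)+1))
      (q := fun q => q.2 == vs[k]) (fun q _ => by simp [eq_comm])]
  rfl

-- the two loops agree for any value list and any message formatter
theorem core_eq (vs : List String) (msg : String → Int → Int → String) :
    (PySem.List.enumerate vs 0).foldl
      (fun warnings p =>
        (PySem.List.enumerate (PySem.List.slice vs (some (p.1 + 1)) none) (p.1 + 1)).foldl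
          (fun warnings q => if p.2 == q.2 then warnings ++ [msg p.2 p.1 q.1] else warnings)
          warnings)
      []
    = (PySem.List.enumerate vs 0).foldl
      (fun warnings p =>
        let group := ((PySem.List.enumerate vs 0).foldl
          (fun p q => p.modify q.2 [] (· ++ [q.1])) (PySem.Dict.empty : PySem.Dict String (List Int))).getD p.2 []
        let after : Int := ((PySem.List.index? group p.1).getD 0 : Nat) + 1
        (PySem.List.slice group (some after) none).foldl
          (fun warnings j => warnings ++ [msg p.2 p.1 j]) warnings)
      [] := by
  have hA := PySem.List.foldl_congr_mem
      (l := PySem.List.enumerate vs 0) (init := ([] : List String))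
      (f := fun warnings p =>
        (PySem.List.enumerate (PySem.List.slice vs (some (p.1 + 1)) none) (p.1 + 1)).foldl
          (fun warnings q => if p.2 == q.2 then warnings ++ [msg p.2 p.1 q.1] else warnings)
          warnings)
      (g := fun acc p => acc ++
        ((PySem.List.enumerate (PySem.List.slice vs (some (p.1 + 1)) none) (p.1 + 1)).filter
          (fun q => p.2 == q.2)).map (fun q => msg p.2 p.1 q.1))
      (fun acc p _ => PySem.List.foldl_append_if _ _ _ _)
  have hB := PySem.List.foldl_congr_mem
      (l := PySem.List.enumerate vs 0) (init := ([] : List String))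
      (f := fun warnings p =>
        let group := ((PySem.List.enumerate vs 0).foldl
          (fun p q => p.modify q.2 [] (· ++ [q.1])) (PySem.Dict.empty : PySem.Dict String (List Int))).getD p.2 []
        let after : Int := ((PySem.List.index? group p.1).getD 0 : Nat) + 1
        (PySem.List.slice group (some after) none).foldl
          (fun warnings j => warnings ++ [msg p.2 p.1 j]) warnings)
      (g := fun acc p => acc ++
        (PySem.List.slice
          (((PySem.List.enumerate vs 0).foldl (fun p q => p.modify q.2 [] (· ++ [q.1]))
            (PySem.Dict.empty : PySem.Dict String (List Int))).getD p.2 [])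
          (some ((((PySem.List.index? (((PySem.List.enumerate vs 0).foldl (fun p q => p.modify q.2 [] (· ++ [q.1]))
            (PySem.Dict.empty : PySem.Dict String (List Int))).getD p.2 []) p.1).getD 0 : Nat) : Int) + 1)) none).map
          (fun j => msg p.2 p.1 j))
      (fun acc p _ => PySem.List.foldl_append_singleton_eq_map _ _ _)
  rw [hA, hB]
  rw [PySem.List.foldl_append_eq_flatMap, PySem.List.foldl_append_eq_flatMap]
  simp only [List.nil_append, List.flatMap_def]
  congr 1
  apply List.map_congr_left
  intro p hp
  rw [PySem.List.mem_enumerate_iff] at hp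
  obtain ⟨k, hk, rfl⟩ := hp
  simp only [zero_add]
  rw [getD_groupFold]
  simp only [PySem.Dict.getD_empty, List.nil_append]
  exact payload_eq vs k hk msg

-- ===== VERDICT (by name: the statement is the Claim_ definition above) =====
theorem check_color_consistency_py_spec : Claim_equal_check_color_consistency_py := by
  intro colors _
  unfold Spec_check_color_consistency_py check_color_consistency_py check_color_consistency_py_alt
  exact core_eq (PySem.Dict.values (PySem.Dict.ofList colors))
    (fun v i j => "Duplicate color value '" ++ v ++ "' for '" ++
      PySem.List.pyGetD (PySem.Dict.keys (PySem.Dict.ofList colors)) i "" ++ "' and '" ++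
      PySem.List.pyGetD (PySem.Dict.keys (PySem.Dict.ofList colors)) j "" ++ "'")
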